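-- pv_equiv track=rewrite | github.com/SANJAIB2004/DSA_python | Matrix/kth-based-matrixProblems/SetAllK×KSubmatricesto0.py | setallkXkto0
-- ===== SOURCE A (Python) =====
-- def setallkXkto0(arr,k):
--     m,n = len(arr), len(arr[0])
--     for i in range(m-k+1):
--         for j in range(n-k+1):
--             for x in range(k):
--                 for y in range(k):
--                     arr[i+x][j+y] = 0
--     return arr
-- ===== SOURCE B (Python) =====
-- def setallkXkto0(arr, k):
--     # The union of all k x k submatrices covers the whole m x n matrix
--     # exactly when 1 <= k <= m and k <= n; otherwise nothing is written.
--     m, n = len(arr), len(arr[0])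
--     if 1 <= k <= m and k <= n:
--         zeros = [0] * n
--         for row in arr:
--             row[:n] = zeros
--     return arr
-- ===== Notes on version B (the rewrite author's own statement) =====
-- stated objective: simpler
-- what changed: Replaces the four nested loops (each k x k block zeroed cell by cell, blocks overlapping) by the observation that the union of all k x k submatrices is the whole matrix iff 1<=k<=m and k<=n, so B zeroes each row's first n cells once, or does nothing.
import Mathlib
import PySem

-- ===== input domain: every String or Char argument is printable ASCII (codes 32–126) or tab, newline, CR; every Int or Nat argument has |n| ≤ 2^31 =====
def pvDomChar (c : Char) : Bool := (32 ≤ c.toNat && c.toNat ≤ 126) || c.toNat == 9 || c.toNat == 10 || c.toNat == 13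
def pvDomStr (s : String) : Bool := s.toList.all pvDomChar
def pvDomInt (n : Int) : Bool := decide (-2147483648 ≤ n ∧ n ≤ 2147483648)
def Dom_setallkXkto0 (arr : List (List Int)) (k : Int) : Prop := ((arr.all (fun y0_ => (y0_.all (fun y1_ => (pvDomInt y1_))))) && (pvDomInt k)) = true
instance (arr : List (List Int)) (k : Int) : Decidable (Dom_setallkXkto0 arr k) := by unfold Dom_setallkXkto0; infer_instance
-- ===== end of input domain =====

-- B zeroes the whole matrix in one pass iff 1 ≤ k ≤ m and k ≤ n (the union of all
-- k×k submatrices), instead of A's four nested loops; A mutates arr in place in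
-- Python — the equivalence proved here is about the return value.

-- ===== PORT A =====
-- arr[i+x][j+y] = 0: indices here are always ≥ 0; out-of-range writes (excluded by
-- Pre_) are no-ops where Python raises IndexError.
def setZero (g : List (List Int)) (r c : Int) : List (List Int) :=
  match g[r.toNat]? with
  | some row => g.set r.toNat (row.set c.toNat 0)
  | none => g

def setallkXkto0 (arr : List (List Int)) (k : Int) : List (List Int) :=
  let m : Int := arr.length
  -- len(arr[0]): Python raises on empty arr (excluded by Pre_); getD [] is a placeholder there
  let n : Int := ((PySem.List.pyGet? arr 0).getD []).length
  (PySem.List.pyRange 0 (m - k + 1) 1).foldl (fun g i =>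
    (PySem.List.pyRange 0 (n - k + 1) 1).foldl (fun g j =>
      (PySem.List.pyRange 0 k 1).foldl (fun g x =>
        (PySem.List.pyRange 0 k 1).foldl (fun g y =>
          setZero g (i + x) (j + y)) g) g) g) arr

-- ===== PORT B =====
def setallkXkto0_alt (arr : List (List Int)) (k : Int) : List (List Int) :=
  let m : Int := arr.length
  let n : Int := ((PySem.List.pyGet? arr 0).getD []).length
  if 1 ≤ k ∧ k ≤ m ∧ k ≤ n then
    arr.map (fun row => List.replicate n.toNat 0 ++ row.drop n.toNat)
  else arr

-- ===== PRECONDITION & SPEC =====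
-- Pre_ excludes exactly the inputs where the Python A raises IndexError: empty arr
-- (arr[0]), and ragged matrices where zeroing happens (1 ≤ k ≤ m, k ≤ n) but some
-- row is shorter than n = len(arr[0]).
def Pre_setallkXkto0 (arr : List (List Int)) (k : Int) : Prop :=
  arr ≠ [] ∧
    ((1 ≤ k ∧ k ≤ (arr.length : Int) ∧ k ≤ ((arr.headD []).length : Int)) →
      ∀ row ∈ arr, (arr.headD []).length ≤ row.length)
instance (arr : List (List Int)) (k : Int) : Decidable (Pre_setallkXkto0 arr k) := by
  unfold Pre_setallkXkto0; infer_instance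

def pvWitness_setallkXkto0 : List (List Int) × Int := ([[1, 2], [3, 4]], 2)

def Spec_setallkXkto0 (arr : List (List Int)) (k : Int) (out : List (List Int)) : Prop := out = setallkXkto0_alt arr k
instance (arr : List (List Int)) (k : Int) (out : List (List Int)) : Decidable (Spec_setallkXkto0 arr k out) := by unfold Spec_setallkXkto0; infer_instance

-- ===== CLAIM (what is proved, stated in full; the proofs are below) =====
def Claim_equal_setallkXkto0 : Prop := ∀ (arr : List (List Int)) (k : Int), Dom_setallkXkto0 arr k → Pre_setallkXkto0 arr k → Spec_setallkXkto0 arr k (setallkXkto0 arr k)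

-- ===== LEMMAS AND PROOFS =====

-- the list of (row, col) coordinates A writes to, in A's order
def pvCoords (m n k : Int) : List (Int × Int) :=
  (PySem.List.pyRange 0 (m - k + 1) 1).flatMap (fun i =>
    (PySem.List.pyRange 0 (n - k + 1) 1).flatMap (fun j =>
      (PySem.List.pyRange 0 k 1).flatMap (fun x =>
        (PySem.List.pyRange 0 k 1).map (fun y => (i + x, j + y)))))

def pvF (L : List (Int × Int)) (g : List (List Int)) : List (List Int) :=
  L.foldl (fun g rc => setZero g rc.1 rc.2) g

def pvZrow (L : List (Int × Int)) (p : Nat) (row : List Int) : List Int :=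
  L.foldl (fun row rc => if rc.1.toNat = p then row.set rc.2.toNat 0 else row) row

lemma foldl_flatMap {α β γ : Type} (l : List α) (g : α → List β) (f : γ → β → γ) (init : γ) :
    (l.flatMap g).foldl f init = l.foldl (fun acc a => (g a).foldl f acc) init := by
  induction l generalizing init with
  | nil => rfl
  | cons a t ih => simp [List.foldl_append, ih]

lemma A_eq_F (arr : List (List Int)) (k : Int) :
    setallkXkto0 arr k =
      pvF (pvCoords (arr.length) (((PySem.List.pyGet? arr 0).getD []).length) k) arr := by
  simp only [setallkXkto0, pvF, pvCoords, foldl_flatMap, List.foldl_map]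

lemma setZero_get (g : List (List Int)) (r c : Int) (p : Nat) :
    (setZero g r c)[p]? = if r.toNat = p then (g[p]?).map (fun row => row.set c.toNat 0) else g[p]? := by
  unfold setZero
  by_cases hp : r.toNat = p
  · subst hp
    cases h : g[r.toNat]? with
    | none => simp [h]
    | some row =>
      have hlt : r.toNat < g.length := by
        have := List.getElem?_eq_some_iff.mp h; exact this.1
      simp [hlt]
  · cases h : g[r.toNat]? with
    | none => simp [hp]
    | some row => simp [hp]

lemma pvF_get (L : List (Int × Int)) (g : List (List Int)) (p : Nat) :
    (pvF L g)[p]? = (g[p]?).map (pvZrow L p) := by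
  induction L generalizing g with
  | nil =>
    show g[p]? = _
    cases h : g[p]? <;> simp [pvZrow]
  | cons rc L' ih =>
    show (pvF L' (setZero g rc.1 rc.2))[p]? = _
    rw [ih, setZero_get]
    by_cases hp : rc.1.toNat = p
    · simp only [hp]
      cases g[p]? <;> simp [pvZrow, hp]
    · simp only [if_neg hp]
      cases g[p]? <;> simp [pvZrow, hp]

lemma pvZrow_get (L : List (Int × Int)) (p : Nat) (row : List Int) (q : Nat) :
    (pvZrow L p row)[q]? =
      if ∃ rc ∈ L, rc.1.toNat = p ∧ rc.2.toNat = q then (row[q]?).map (fun _ => (0 : Int)) else row[q]? := by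
  induction L generalizing row with
  | nil => simp [pvZrow]
  | cons rc L' ih =>
    have hstep : pvZrow (rc :: L') p row
        = pvZrow L' p (if rc.1.toNat = p then row.set rc.2.toNat 0 else row) := rfl
    have hrow1 : (if rc.1.toNat = p then row.set rc.2.toNat 0 else row)[q]?
        = if rc.1.toNat = p ∧ rc.2.toNat = q then (row[q]?).map (fun _ => (0 : Int)) else row[q]? := by
      by_cases hp : rc.1.toNat = p
      · by_cases hq : rc.2.toNat = q
        · rw [if_pos hp, if_pos ⟨hp, hq⟩, ← hq, List.getElem?_set_self']
          cases row[rc.2.toNat]? <;> rfl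
        · rw [if_pos hp, if_neg (fun h => hq h.2), List.getElem?_set_ne hq]
      · rw [if_neg hp, if_neg (fun h => hp h.1)]
    rw [hstep, ih, hrow1]
    simp only [List.exists_mem_cons_iff]
    by_cases hd : rc.1.toNat = p ∧ rc.2.toNat = q
    · rw [if_pos hd, if_pos (Or.inl hd)]
      by_cases hcov : ∃ rc ∈ L', rc.1.toNat = p ∧ rc.2.toNat = q
      · rw [if_pos hcov]; cases row[q]? <;> rfl
      · rw [if_neg hcov]
    · rw [if_neg hd]
      by_cases hcov : ∃ rc ∈ L', rc.1.toNat = p ∧ rc.2.toNat = q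
      · rw [if_pos hcov, if_pos (Or.inr hcov)]
      · rw [if_neg hcov, if_neg (fun h => h.elim hd hcov)]

lemma coords_mem_iff (m n k : Int) (rc : Int × Int) :
    rc ∈ pvCoords m n k ↔ ∃ i j x y : Int,
      (0 ≤ i ∧ i < m - k + 1) ∧ (0 ≤ j ∧ j < n - k + 1) ∧ (0 ≤ x ∧ x < k) ∧ (0 ≤ y ∧ y < k) ∧
      rc = (i + x, j + y) := by
  simp only [pvCoords, List.mem_flatMap, List.mem_map, PySem.List.mem_pyRange_one]
  constructor
  · rintro ⟨i, hi, j, hj, x, hx, y, hy, rfl⟩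
    exact ⟨i, j, x, y, hi, hj, hx, hy, rfl⟩
  · rintro ⟨i, j, x, y, hi, hj, hx, hy, rfl⟩
    exact ⟨i, hi, j, hj, x, hx, y, hy, rfl⟩

lemma coords_cover (m n k : Int) (hk : 1 ≤ k) (hm : k ≤ m) (hn : k ≤ n) (p q : Nat)
    (hp : (p : Int) < m) (hq : (q : Int) < n) :
    ∃ rc ∈ pvCoords m n k, rc.1.toNat = p ∧ rc.2.toNat = q := by
  refine ⟨((p : Int), (q : Int)), ?_, by simp, by simp⟩
  rw [coords_mem_iff]
  refine ⟨min (p : Int) (m - k), min (q : Int) (n - k),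
    (p : Int) - min (p : Int) (m - k), (q : Int) - min (q : Int) (n - k),
    by omega, by omega, by omega, by omega, ?_⟩
  simp only [Prod.mk.injEq]
  omega

lemma coords_col_lt (m n k : Int) (rc : Int × Int) (h : rc ∈ pvCoords m n k) :
    0 ≤ rc.2 ∧ rc.2 < n := by
  rw [coords_mem_iff] at h
  obtain ⟨i, j, x, y, hi, hj, hx, hy, rfl⟩ := h
  constructor <;> simp <;> omega

lemma coords_nil (m n k : Int) (h : ¬(1 ≤ k ∧ k ≤ m ∧ k ≤ n)) : pvCoords m n k = [] := by
  rw [List.eq_nil_iff_forall_not_mem]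
  intro rc hrc
  rw [coords_mem_iff] at hrc
  obtain ⟨i, j, x, y, hi, hj, hx, hy, _⟩ := hrc
  omega

-- ===== VERDICT (by name: the statement is the Claim_ definition above) =====
theorem setallkXkto0_spec : Claim_equal_setallkXkto0 := by
  intro arr k _ hpre
  obtain ⟨hne, hrows⟩ := hpre
  obtain ⟨h0, t, rfl⟩ := List.exists_cons_of_ne_nil hne
  show setallkXkto0 (h0 :: t) k = setallkXkto0_alt (h0 :: t) k
  have hget0 : (PySem.List.pyGet? (h0 :: t) 0).getD [] = h0 := by
    simp [PySem.List.pyGet?, PySem.List.pyIdx?]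
  set arr := h0 :: t with harr
  set m : Int := (arr.length : Int) with hm
  set n : Int := (h0.length : Int) with hn
  have hA : setallkXkto0 arr k = pvF (pvCoords m n k) arr := by
    rw [A_eq_F]; rw [hget0]
  by_cases hc : 1 ≤ k ∧ k ≤ m ∧ k ≤ n
  · -- the whole matrix is zeroed
    have hB : setallkXkto0_alt arr k =
        arr.map (fun row => List.replicate n.toNat 0 ++ row.drop n.toNat) := by
      simp only [setallkXkto0_alt]; rw [hget0]
      rw [if_pos hc]
    rw [hA, hB]
    have hlenrows := hrows ⟨hc.1, hc.2.1, hc.2.2⟩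
    apply List.ext_getElem?
    intro p
    rw [pvF_get, List.getElem?_map]
    cases hrow : arr[p]? with
    | none => rfl
    | some row =>
      have hmem : row ∈ arr := List.mem_of_getElem? hrow
      have hrlen : h0.length ≤ row.length := by
        have := hlenrows row hmem; simpa using this
      simp only [Option.map_some]
      congr 1
      apply List.ext_getElem?
      intro q
      rw [pvZrow_get]
      by_cases hq : q < h0.length
      · rw [if_pos (coords_cover m n k hc.1 hc.2.1 hc.2.2 p q
          (by have := List.getElem?_eq_some_iff.mp hrow; rw [hm]; exact_mod_cast this.1)
          (by rw [hn]; exact_mod_cast hq))]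
        have hqr : q < row.length := lt_of_lt_of_le hq hrlen
        have hqrep : q < (List.replicate n.toNat (0 : Int)).length := by
          simp [hn]; omega
        rw [List.getElem?_append_left hqrep]
        cases hv : row[q]? with
        | none => exact absurd (List.getElem?_eq_none_iff.mp hv) (by omega)
        | some v => simp [List.getElem?_replicate, hn]; omega
      · rw [if_neg (by rintro ⟨rc, hmemc, hp1, hp2⟩
                       have := coords_col_lt m n k rc hmemc
                       rw [hn] at this; omega)]
        rw [List.getElem?_append_right (by simp [hn]; omega)]
        rw [List.getElem?_drop]
        congr 1
        simp [hn]; omega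
  · -- no k×k submatrix exists (or k ≤ 0): both return arr unchanged
    have hB : setallkXkto0_alt arr k = arr := by
      simp only [setallkXkto0_alt]; rw [hget0]
      rw [if_neg (by rw [← hm, ← hn] at *; exact hc)]
    rw [hA, hB, coords_nil m n k hc]
    rfl
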